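-- pv_equiv track=rewrite | github.com/decordoba/augmented-reality-with-fiducial-markers | scripts/markerdatabase.py | match_marker_pattern
-- ===== SOURCE A (Python) =====
-- MARKER_TABLE = [[[[0, 1, 0, 1, 0, 0, 0, 1, 1],
--                   [0, 0, 1, 1, 0, 1, 0, 1, 0],
--                   [1, 1, 0, 0, 0, 1, 0, 1, 0],
--                   [0, 1, 0, 1, 0, 1, 1, 0, 0]],
--                  'm0'],
--                 [[[1, 0, 0, 0, 1, 0, 1, 0, 1],
--                   [0, 0, 1, 0, 1, 0, 1, 0, 1],
--                   [1, 0, 1, 0, 1, 0, 0, 0, 1],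
--                   [1, 0, 1, 0, 1, 0, 1, 0, 0]],
--                  'm1'],
--                 [[[1, 0, 1, 1, 1, 0, 0, 0, 1],
--                   [1, 0, 1, 0, 1, 0, 1, 1, 0],
--                   [1, 0, 0, 0, 1, 1, 1, 0, 1],
--                   [0, 1, 1, 0, 1, 0, 1, 0, 1]],
--                  'm2'],
--                 [[[1, 1, 1, 1, 1, 1, 0, 0, 1],
--                   [1, 1, 1, 1, 1, 0, 1, 1, 0],
--                   [1, 0, 0, 1, 1, 1, 1, 1, 1],
--                   [0, 1, 1, 0, 1, 1, 1, 1, 1]],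
--                  'm3'],
--                 [[[0, 0, 0, 0, 0, 0, 1, 0, 0],
--                   [0, 0, 0, 0, 0, 0, 0, 0, 1],
--                   [0, 0, 1, 0, 0, 0, 0, 0, 0],
--                   [1, 0, 0, 0, 0, 0, 0, 0, 0]],
--                  'm4'],
--                 [[[0, 1, 0, 1, 1, 1, 1, 0, 0],
--                   [0, 1, 0, 1, 1, 0, 0, 1, 1],
--                   [0, 0, 1, 1, 1, 1, 0, 1, 0],
--                   [1, 1, 0, 0, 1, 1, 0, 1, 0]],
--                  'm5'],
--                 [[[1, 1, 1, 1, 0, 1, 0, 1, 1],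
--                   [1, 1, 1, 1, 0, 1, 1, 1, 0],
--                   [1, 1, 0, 1, 0, 1, 1, 1, 1],
--                   [0, 1, 1, 1, 0, 1, 1, 1, 1]],
--                  'm6'],
--                 [[[1, 1, 1, 0, 1, 1, 0, 0, 1],
--                   [1, 1, 1, 1, 1, 0, 1, 0, 0],
--                   [1, 0, 0, 1, 1, 0, 1, 1, 1],
--                   [0, 0, 1, 0, 1, 1, 1, 1, 1]],
--                  'm7'],
--                 [[[1, 1, 1, 0, 1, 0, 0, 1, 1],
--                   [1, 0, 1, 1, 1, 1, 1, 0, 0],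
--                   [1, 1, 0, 0, 1, 0, 1, 1, 1],
--                   [0, 0, 1, 1, 1, 1, 1, 0, 1]],
--                  'm8'],
--                 [[[1, 1, 1, 1, 1, 1, 0, 1, 1],
--                   [1, 1, 1, 1, 1, 1, 1, 1, 0],
--                   [1, 1, 0, 1, 1, 1, 1, 1, 1],
--                   [0, 1, 1, 1, 1, 1, 1, 1, 1]],
--                  'm9'],
--                 [[[1, 1, 1, 0, 1, 0, 0, 0, 1],
--                   [1, 0, 1, 1, 1, 0, 1, 0, 0],
--                   [1, 0, 0, 0, 1, 0, 1, 1, 1],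
--                   [0, 0, 1, 0, 1, 1, 1, 0, 1]],
--                  'm10']]
--
-- def match_marker_pattern(marker_pattern):
--     # marker_pattern is binary 3x3 array
--     marker_found = False
--     # store rotation (there are 4 possible rotations)
--     marker_rotation = None
--     # store which marker it is
--     marker_name = None
--
--     for marker_record in MARKER_TABLE:
--         for idx, val in enumerate(marker_record[0]):
--             if marker_pattern == val:
--                 marker_found = True
--                 marker_rotation = idx
--                 marker_name = marker_record[1]
--                 break
--         if marker_found: break
--
--     return (marker_found, marker_rotation, marker_name)
-- ===== SOURCE B (Python) =====
-- # B: encode the 3x3 binary pattern as a 9-bit integer (big-endian) and look it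
-- # up in a precomputed code table, instead of scanning the nested pattern table.
--
-- MARKER_CODES = {
--     163: (0, 'm0'), 106: (1, 'm0'), 394: (2, 'm0'), 172: (3, 'm0'),
--     277: (0, 'm1'), 85: (1, 'm1'), 337: (2, 'm1'), 340: (3, 'm1'),
--     369: (0, 'm2'), 342: (1, 'm2'), 285: (2, 'm2'), 213: (3, 'm2'),
--     505: (0, 'm3'), 502: (1, 'm3'), 319: (2, 'm3'), 223: (3, 'm3'),
--     4: (0, 'm4'), 1: (1, 'm4'), 64: (2, 'm4'), 256: (3, 'm4'),
--     188: (0, 'm5'), 179: (1, 'm5'), 122: (2, 'm5'), 410: (3, 'm5'),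
--     491: (0, 'm6'), 494: (1, 'm6'), 431: (2, 'm6'), 239: (3, 'm6'),
--     473: (0, 'm7'), 500: (1, 'm7'), 311: (2, 'm7'), 95: (3, 'm7'),
--     467: (0, 'm8'), 380: (1, 'm8'), 407: (2, 'm8'), 125: (3, 'm8'),
--     507: (0, 'm9'), 510: (1, 'm9'), 447: (2, 'm9'), 255: (3, 'm9'),
--     465: (0, 'm10'), 372: (1, 'm10'), 279: (2, 'm10'), 93: (3, 'm10'),
-- }
--
--
-- def _code(pattern):
--     c = 0
--     for v in pattern:
--         c = c * 2 + v
--     return c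
--
--
-- def match_marker_pattern(marker_pattern):
--     # only length-9 lists of 0/1 can equal a table pattern
--     if len(marker_pattern) == 9 and all(v == 0 or v == 1 for v in marker_pattern):
--         hit = MARKER_CODES.get(_code(marker_pattern))
--         if hit is not None:
--             return (True, hit[0], hit[1])
--     return (False, None, None)
-- ===== Notes on version B (the rewrite author's own statement) =====
-- stated objective: alternative
-- what changed: Replaced the nested table scan with break flags by encoding the length-9 binary pattern as a 9-bit integer and looking it up in a precomputed code->(rotation,name) table; a shape guard sends every other input straight to the not-found result.
import Mathlib
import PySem

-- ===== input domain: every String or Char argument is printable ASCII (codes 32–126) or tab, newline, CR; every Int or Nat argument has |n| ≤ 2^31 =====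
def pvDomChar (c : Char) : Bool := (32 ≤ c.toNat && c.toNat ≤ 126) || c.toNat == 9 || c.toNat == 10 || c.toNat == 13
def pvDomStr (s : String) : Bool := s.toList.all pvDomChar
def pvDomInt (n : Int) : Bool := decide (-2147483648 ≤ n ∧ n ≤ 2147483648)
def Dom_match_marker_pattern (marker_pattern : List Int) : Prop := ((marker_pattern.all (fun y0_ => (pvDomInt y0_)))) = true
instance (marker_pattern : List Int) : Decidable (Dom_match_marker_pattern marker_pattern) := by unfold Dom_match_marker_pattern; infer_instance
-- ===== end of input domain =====

-- B replaces A's nested table scan by encoding the 9-bit pattern as an integer and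
-- looking it up in a precomputed code table (alternative data representation).

-- ===== PORT A =====
def MARKER_TABLE : List (List (List Int) × String) := [
  ([[0, 1, 0, 1, 0, 0, 0, 1, 1], [0, 0, 1, 1, 0, 1, 0, 1, 0], [1, 1, 0, 0, 0, 1, 0, 1, 0], [0, 1, 0, 1, 0, 1, 1, 0, 0]], "m0"),
  ([[1, 0, 0, 0, 1, 0, 1, 0, 1], [0, 0, 1, 0, 1, 0, 1, 0, 1], [1, 0, 1, 0, 1, 0, 0, 0, 1], [1, 0, 1, 0, 1, 0, 1, 0, 0]], "m1"),
  ([[1, 0, 1, 1, 1, 0, 0, 0, 1], [1, 0, 1, 0, 1, 0, 1, 1, 0], [1, 0, 0, 0, 1, 1, 1, 0, 1], [0, 1, 1, 0, 1, 0, 1, 0, 1]], "m2"),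
  ([[1, 1, 1, 1, 1, 1, 0, 0, 1], [1, 1, 1, 1, 1, 0, 1, 1, 0], [1, 0, 0, 1, 1, 1, 1, 1, 1], [0, 1, 1, 0, 1, 1, 1, 1, 1]], "m3"),
  ([[0, 0, 0, 0, 0, 0, 1, 0, 0], [0, 0, 0, 0, 0, 0, 0, 0, 1], [0, 0, 1, 0, 0, 0, 0, 0, 0], [1, 0, 0, 0, 0, 0, 0, 0, 0]], "m4"),
  ([[0, 1, 0, 1, 1, 1, 1, 0, 0], [0, 1, 0, 1, 1, 0, 0, 1, 1], [0, 0, 1, 1, 1, 1, 0, 1, 0], [1, 1, 0, 0, 1, 1, 0, 1, 0]], "m5"),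
  ([[1, 1, 1, 1, 0, 1, 0, 1, 1], [1, 1, 1, 1, 0, 1, 1, 1, 0], [1, 1, 0, 1, 0, 1, 1, 1, 1], [0, 1, 1, 1, 0, 1, 1, 1, 1]], "m6"),
  ([[1, 1, 1, 0, 1, 1, 0, 0, 1], [1, 1, 1, 1, 1, 0, 1, 0, 0], [1, 0, 0, 1, 1, 0, 1, 1, 1], [0, 0, 1, 0, 1, 1, 1, 1, 1]], "m7"),
  ([[1, 1, 1, 0, 1, 0, 0, 1, 1], [1, 0, 1, 1, 1, 1, 1, 0, 0], [1, 1, 0, 0, 1, 0, 1, 1, 1], [0, 0, 1, 1, 1, 1, 1, 0, 1]], "m8"),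
  ([[1, 1, 1, 1, 1, 1, 0, 1, 1], [1, 1, 1, 1, 1, 1, 1, 1, 0], [1, 1, 0, 1, 1, 1, 1, 1, 1], [0, 1, 1, 1, 1, 1, 1, 1, 1]], "m9"),
  ([[1, 1, 1, 0, 1, 0, 0, 0, 1], [1, 0, 1, 1, 1, 0, 1, 0, 0], [1, 0, 0, 0, 1, 0, 1, 1, 1], [0, 0, 1, 0, 1, 1, 1, 0, 1]], "m10")]

-- inner 'for idx, val in enumerate(marker_record[0])' with break: returns the idx of the first match
def pvInner (marker_pattern : List Int) : List (Int × List Int) → Option Int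
  | [] => none
  | (idx, val) :: rest => if marker_pattern == val then some idx else pvInner marker_pattern rest

-- outer 'for marker_record in MARKER_TABLE' with the marker_found break flag
def pvOuter (marker_pattern : List Int) : List (List (List Int) × String) → Bool × Option Int × Option String
  | [] => (false, none, none)
  | record :: rest =>
    match pvInner marker_pattern (PySem.List.enumerate record.1) with
    | some idx => (true, some idx, some record.2)
    | none => pvOuter marker_pattern rest

def match_marker_pattern (marker_pattern : List Int) : Bool × Option Int × Option String :=
  pvOuter marker_pattern MARKER_TABLE

-- ===== PORT B =====
-- precomputed 9-bit code -> (rotation, name) table (a dict literal in Source B)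
def MARKER_CODES : PySem.Dict Int (Int × String) := PySem.Dict.mk [
  (163, (0, "m0")), (106, (1, "m0")), (394, (2, "m0")), (172, (3, "m0")),
  (277, (0, "m1")), (85, (1, "m1")), (337, (2, "m1")), (340, (3, "m1")),
  (369, (0, "m2")), (342, (1, "m2")), (285, (2, "m2")), (213, (3, "m2")),
  (505, (0, "m3")), (502, (1, "m3")), (319, (2, "m3")), (223, (3, "m3")),
  (4, (0, "m4")), (1, (1, "m4")), (64, (2, "m4")), (256, (3, "m4")),
  (188, (0, "m5")), (179, (1, "m5")), (122, (2, "m5")), (410, (3, "m5")),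
  (491, (0, "m6")), (494, (1, "m6")), (431, (2, "m6")), (239, (3, "m6")),
  (473, (0, "m7")), (500, (1, "m7")), (311, (2, "m7")), (95, (3, "m7")),
  (467, (0, "m8")), (380, (1, "m8")), (407, (2, "m8")), (125, (3, "m8")),
  (507, (0, "m9")), (510, (1, "m9")), (447, (2, "m9")), (255, (3, "m9")),
  (465, (0, "m10")), (372, (1, "m10")), (279, (2, "m10")), (93, (3, "m10"))]

-- _code: big-endian binary value of the pattern (c = 0; for v: c = c*2 + v)
def pvCode (pattern : List Int) : Int :=
  pattern.foldl (fun c v => c * 2 + v) 0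

def match_marker_pattern_alt (marker_pattern : List Int) : Bool × Option Int × Option String :=
  if marker_pattern.length == 9 && marker_pattern.all (fun v => v == 0 || v == 1) then
    match MARKER_CODES.get? (pvCode marker_pattern) with
    | some hit => (true, some hit.1, some hit.2)
    | none => (false, none, none)
  else (false, none, none)

-- ===== PRECONDITION & SPEC =====
def Spec_match_marker_pattern (marker_pattern : List Int) (out : Bool × Option Int × Option String) : Prop := out = match_marker_pattern_alt marker_pattern
instance (marker_pattern : List Int) (out : Bool × Option Int × Option String) : Decidable (Spec_match_marker_pattern marker_pattern out) := by unfold Spec_match_marker_pattern; infer_instance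

-- ===== CLAIM =====
def Claim_equal_match_marker_pattern : Prop := ∀ (marker_pattern : List Int), Dom_match_marker_pattern marker_pattern → Spec_match_marker_pattern marker_pattern (match_marker_pattern marker_pattern)

-- ===== LEMMAS AND PROOFS =====

-- the shape guard of B, as a Bool on lists
def pvOk (p : List Int) : Bool :=
  p.length == 9 && p.all (fun v => v == 0 || v == 1)

-- the flat (pattern, rotation, name) list A's nested scan walks over
def pvFlat (tbl : List (List (List Int) × String)) : List (List Int × Int × String) :=
  tbl.flatMap (fun r => (PySem.List.enumerate r.1).map (fun p => (p.2, (p.1, r.2))))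

-- first-match association lookup by pattern equality
def pvAssoc (mp : List Int) : List (List Int × Int × String) → Option (Int × String)
  | [] => none
  | (k, v) :: rest => if k == mp then some v else pvAssoc mp rest

-- first-match association lookup by code equality
def pvAssocC (c : Int) : List (Int × Int × String) → Option (Int × String)
  | [] => none
  | (k, v) :: rest => if k == c then some v else pvAssocC c rest

theorem pvGet_mk (c : Int) : ∀ (L : List (Int × Int × String)),
    (PySem.Dict.mk L).get? c = pvAssocC c L := by
  intro L
  induction L with
  | nil => rfl
  | cons h t ih =>
    obtain ⟨k, v⟩ := h
    rw [PySem.Dict.get?_mk_cons, pvAssocC, ih]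

theorem pvAssoc_append (mp : List Int) (xs ys : List (List Int × Int × String)) :
    pvAssoc mp (xs ++ ys) =
      match pvAssoc mp xs with
      | some v => some v
      | none => pvAssoc mp ys := by
  induction xs with
  | nil => rfl
  | cons h t ih =>
    obtain ⟨k, v⟩ := h
    by_cases hk : k == mp
    · simp [pvAssoc, hk]
    · simp only [List.cons_append, pvAssoc, hk]
      simp only [Bool.false_eq_true, if_false, ih]

theorem pvInner_assoc (mp : List Int) (nm : String) :
    ∀ (ps : List (Int × List Int)),
      pvAssoc mp (ps.map (fun p => (p.2, (p.1, nm)))) =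
        (pvInner mp ps).map (fun i => (i, nm)) := by
  intro ps
  induction ps with
  | nil => rfl
  | cons h t ih =>
    obtain ⟨i, v⟩ := h
    by_cases hv : mp = v
    · subst hv
      simp [pvAssoc, pvInner]
    · have h1 : (v == mp) = false := by simp [Ne.symm hv]
      have h2 : (mp == v) = false := by simp [hv]
      simp only [List.map_cons, pvAssoc, pvInner, h1, h2, Bool.false_eq_true, if_false, ih]

-- A's nested scan = first-match lookup over the flattened table
theorem pvOuter_assoc (mp : List Int) : ∀ (tbl : List (List (List Int) × String)),
    pvOuter mp tbl =
      match pvAssoc mp (pvFlat tbl) with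
      | none => (false, none, none)
      | some hit => (true, some hit.1, some hit.2) := by
  intro tbl
  induction tbl with
  | nil => rfl
  | cons r rest ih =>
    simp only [pvFlat, List.flatMap_cons, pvAssoc_append, pvInner_assoc, pvOuter, ih]
    cases pvInner mp (PySem.List.enumerate r.1) <;> rfl

-- pvCode arithmetic: peel the head
theorem pvCode_cons_acc (a : Int) : ∀ (xs : List Int),
    xs.foldl (fun c v => c * 2 + v) a = a * 2 ^ xs.length + xs.foldl (fun c v => c * 2 + v) 0 := by
  intro xs
  induction xs generalizing a with
  | nil => simp
  | cons x t ih =>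
    simp only [List.foldl_cons, List.length_cons]
    rw [ih (a * 2 + x), ih (0 * 2 + x)]
    ring

theorem pvCode_bounds : ∀ (xs : List Int), xs.all (fun v => v == 0 || v == 1) = true →
    0 ≤ pvCode xs ∧ pvCode xs < 2 ^ xs.length := by
  intro xs
  induction xs with
  | nil => intro _; simp [pvCode]
  | cons x t ih =>
    intro h
    simp only [List.all_cons, Bool.and_eq_true] at h
    obtain ⟨hx, ht⟩ := h
    have hx01 : x = 0 ∨ x = 1 := by
      rcases Bool.or_eq_true_iff.mp hx with h' | h' <;> [left; right] <;> exact eq_of_beq h'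
    obtain ⟨h0, h1⟩ := ih ht
    have hc : pvCode (x :: t) = x * 2 ^ t.length + pvCode t := by
      simp only [pvCode, List.foldl_cons]
      have := pvCode_cons_acc (0 * 2 + x) t
      simpa using this
    have hpow : (0:Int) < 2 ^ t.length := by positivity
    constructor
    · rw [hc]; rcases hx01 with rfl | rfl <;> simp <;> omega
    · rw [hc]; simp only [List.length_cons, pow_succ]
      rcases hx01 with rfl | rfl <;> nlinarith

-- injectivity of pvCode on 0/1 lists of equal length
theorem pvCode_inj : ∀ (xs ys : List Int),
    xs.all (fun v => v == 0 || v == 1) = true → ys.all (fun v => v == 0 || v == 1) = true →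
    xs.length = ys.length → pvCode xs = pvCode ys → xs = ys := by
  intro xs
  induction xs with
  | nil =>
    intro ys _ _ hlen _
    exact (List.length_eq_zero_iff.mp hlen.symm).symm
  | cons x t ih =>
    intro ys hxs hys hlen hcode
    cases ys with
    | nil => simp at hlen
    | cons y s =>
      simp only [List.all_cons, Bool.and_eq_true] at hxs hys
      obtain ⟨hx, ht⟩ := hxs
      obtain ⟨hy, hs⟩ := hys
      have hx01 : x = 0 ∨ x = 1 := by
        rcases Bool.or_eq_true_iff.mp hx with h' | h' <;> [left; right] <;> exact eq_of_beq h'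
      have hy01 : y = 0 ∨ y = 1 := by
        rcases Bool.or_eq_true_iff.mp hy with h' | h' <;> [left; right] <;> exact eq_of_beq h'
      have hlen' : t.length = s.length := by simpa using hlen
      have hct : pvCode (x :: t) = x * 2 ^ t.length + pvCode t := by
        simp only [pvCode, List.foldl_cons]
        have := pvCode_cons_acc (0 * 2 + x) t
        simpa using this
      have hcs : pvCode (y :: s) = y * 2 ^ s.length + pvCode s := by
        simp only [pvCode, List.foldl_cons]
        have := pvCode_cons_acc (0 * 2 + y) s
        simpa using this
      obtain ⟨ht0, ht1⟩ := pvCode_bounds t ht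
      obtain ⟨hs0, hs1⟩ := pvCode_bounds s hs
      rw [hct, hcs, hlen'] at hcode
      have hxy : x = y ∧ pvCode t = pvCode s := by
        rcases hx01 with rfl | rfl <;> rcases hy01 with rfl | rfl <;>
          constructor <;> first | rfl | (rw [hlen'] at ht1; omega)
      obtain ⟨hxy1, hxy2⟩ := hxy
      rw [hxy1, ih s ht hs hlen' hxy2]

-- lookup by pattern = lookup by code, provided all keys and the query pass the shape guard
theorem pvAssoc_code (mp : List Int) (hmp : pvOk mp = true) :
    ∀ (L : List (List Int × Int × String)), (L.all (fun e => pvOk e.1)) = true →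
      pvAssocC (pvCode mp) (L.map (fun e => (pvCode e.1, e.2))) = pvAssoc mp L := by
  intro L
  induction L with
  | nil => intro _; rfl
  | cons e t ih =>
    intro hall
    simp only [List.all_cons, Bool.and_eq_true] at hall
    obtain ⟨he, ht⟩ := hall
    obtain ⟨k, v⟩ := e
    simp only [pvOk, Bool.and_eq_true, beq_iff_eq] at he hmp
    have hiff : (pvCode k == pvCode mp) = (k == mp) := by
      by_cases hk : k = mp
      · subst hk; simp
      · have : pvCode k ≠ pvCode mp := fun hc =>
          hk (pvCode_inj k mp he.2 hmp.2 (he.1.trans hmp.1.symm) hc)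
        simp [hk, this]
    simp only [List.map_cons, pvAssocC, pvAssoc, hiff]
    by_cases hk : (k == mp) = true
    · simp [hk]
    · simp only [hk, Bool.false_eq_true, if_false]
      exact ih ht

-- a query failing the shape guard matches no key that passes it
theorem pvAssoc_none (mp : List Int) (hmp : pvOk mp = false) :
    ∀ (L : List (List Int × Int × String)), (L.all (fun e => pvOk e.1)) = true →
      pvAssoc mp L = none := by
  intro L
  induction L with
  | nil => intro _; rfl
  | cons e t ih =>
    intro hall
    simp only [List.all_cons, Bool.and_eq_true] at hall
    obtain ⟨he, ht⟩ := hall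
    obtain ⟨k, v⟩ := e
    have hk : (k == mp) = false := by
      by_cases h : k = mp
      · subst h; rw [he] at hmp; exact absurd hmp (by simp)
      · simp [h]
    simp only [pvAssoc, hk, Bool.false_eq_true, if_false]
    exact ih ht

-- concrete facts about the table, checked by computation
theorem pvFlat_ok : ((pvFlat MARKER_TABLE).all (fun e => pvOk e.1)) = true := by decide

set_option maxRecDepth 4096 in
theorem pvCodes_eq :
    MARKER_CODES = PySem.Dict.mk ((pvFlat MARKER_TABLE).map (fun e => (pvCode e.1, e.2))) := by
  decide

-- ===== VERDICT =====
theorem match_marker_pattern_spec : Claim_equal_match_marker_pattern := by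
  intro mp _
  unfold Spec_match_marker_pattern match_marker_pattern match_marker_pattern_alt
  rw [pvOuter_assoc, pvCodes_eq, pvGet_mk]
  by_cases hok : pvOk mp = true
  · rw [pvAssoc_code mp hok _ pvFlat_ok]
    have : (mp.length == 9 && mp.all fun v => v == 0 || v == 1) = true := hok
    rw [this]
    cases pvAssoc mp (pvFlat MARKER_TABLE) <;> simp
  · have hok' : pvOk mp = false := Bool.not_eq_true _ ▸ (by simpa using hok)
    rw [pvAssoc_none mp hok' _ pvFlat_ok]
    have : (mp.length == 9 && mp.all fun v => v == 0 || v == 1) = false := hok'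
    rw [this]
    simp
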